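-- pv_equiv track=rewrite | github.com/ghostescript/ovaltinepy | ovaltine.py | atbash_handler
-- ===== SOURCE A (Python) =====
-- def atbash_handler(text, **kwargs):
--     result = ""
--     for char in text:
--         if 'a' <= char <= 'z':
--             result += chr(ord('z') - (ord(char) - ord('a')))
--         elif 'A' <= char <= 'Z':
--             result += chr(ord('Z') - (ord(char) - ord('A')))
--         else:
--             result += char
--     return result
-- ===== SOURCE B (Python) =====
-- import string
--
-- _ATBASH = str.maketrans(
--     string.ascii_lowercase + string.ascii_uppercase,
--     string.ascii_lowercase[::-1] + string.ascii_uppercase[::-1],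
-- )
--
-- def atbash_handler(text, **kwargs):
--     return text.translate(_ATBASH)
-- ===== Notes on version B (the rewrite author's own statement) =====
-- stated objective: idiomatic
-- what changed: Replaced the per-character if/elif ord-arithmetic accumulator loop with a translation table built once via str.maketrans (a-z->z-a, A-Z->Z-A) applied by str.translate in one table-driven pass.
import Mathlib
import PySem

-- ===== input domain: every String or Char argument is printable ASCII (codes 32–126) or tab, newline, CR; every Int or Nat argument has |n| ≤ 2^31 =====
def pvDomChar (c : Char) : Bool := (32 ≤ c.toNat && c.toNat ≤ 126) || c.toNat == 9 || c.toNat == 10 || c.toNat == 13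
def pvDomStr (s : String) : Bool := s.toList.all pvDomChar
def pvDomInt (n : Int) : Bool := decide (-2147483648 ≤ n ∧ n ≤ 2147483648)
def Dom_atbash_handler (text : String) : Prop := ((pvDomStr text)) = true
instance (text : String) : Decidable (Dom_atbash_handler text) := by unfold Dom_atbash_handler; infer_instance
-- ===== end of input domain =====

-- B builds the a↔z / A↔Z translation table once (str.maketrans) and applies it in one
-- table-driven pass (str.translate), instead of A's per-character if/elif ord arithmetic.

-- ===== PORT A =====
def atbash_handler (text : String) : String :=
  text.toList.foldl (fun result char =>
    if 'a' ≤ char ∧ char ≤ 'z' then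
      result ++ String.ofList [Char.ofNat ('z'.toNat - (char.toNat - 'a'.toNat))]
    else if 'A' ≤ char ∧ char ≤ 'Z' then
      result ++ String.ofList [Char.ofNat ('Z'.toNat - (char.toNat - 'A'.toNat))]
    else
      result ++ String.ofList [char]) ""

-- ===== PORT B =====
-- str.maketrans(lower+upper, lower[::-1]+upper[::-1]) as a Char→Char dict
def pvAtbashTable : PySem.Dict Char Char :=
  PySem.Dict.ofList
    (List.zip ("abcdefghijklmnopqrstuvwxyz".toList ++ "ABCDEFGHIJKLMNOPQRSTUVWXYZ".toList)
              ("abcdefghijklmnopqrstuvwxyz".toList.reverse ++ "ABCDEFGHIJKLMNOPQRSTUVWXYZ".toList.reverse))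

-- str.translate: each char replaced by its table entry, absent chars unchanged
def atbash_handler_alt (text : String) : String :=
  String.ofList (text.toList.map (fun c => (pvAtbashTable.get? c).getD c))

-- ===== PRECONDITION & SPEC =====
def Spec_atbash_handler (text : String) (out : String) : Prop := out = atbash_handler_alt text
instance (text : String) (out : String) : Decidable (Spec_atbash_handler text out) := by unfold Spec_atbash_handler; infer_instance

-- ===== CLAIM (what is proved, stated in full; the proofs are below) =====
def Claim_equal_atbash_handler : Prop := ∀ (text : String), Dom_atbash_handler text → Spec_atbash_handler text (atbash_handler text)

-- ===== LEMMAS AND PROOFS =====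
set_option maxRecDepth 8000

-- A's per-character transform, for reasoning about the fold
def pvAtbashCharA (c : Char) : Char :=
  if 'a' ≤ c ∧ c ≤ 'z' then Char.ofNat ('z'.toNat - (c.toNat - 'a'.toNat))
  else if 'A' ≤ c ∧ c ≤ 'Z' then Char.ofNat ('Z'.toNat - (c.toNat - 'A'.toNat))
  else c

lemma pvAtbashChar_eq (c : Char) :
    pvAtbashCharA c = (pvAtbashTable.get? c).getD c := by
  by_cases hl : 97 ≤ c.toNat ∧ c.toNat ≤ 122
  · obtain ⟨h1, h2⟩ := hl
    rw [← Char.ofNat_toNat c]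
    set n := c.toNat with hn
    interval_cases n <;> decide
  · by_cases hu : 65 ≤ c.toNat ∧ c.toNat ≤ 90
    · obtain ⟨h1, h2⟩ := hu
      rw [← Char.ofNat_toNat c]
      set n := c.toNat with hn
      interval_cases n <;> decide
    · have hla : ¬ ('a' ≤ c ∧ c ≤ 'z') := by
        simp only [Char.le_def] at *
        intro h
        exact hl ⟨h.1, h.2⟩
      have hua : ¬ ('A' ≤ c ∧ c ≤ 'Z') := by
        simp only [Char.le_def] at *
        intro h
        exact hu ⟨h.1, h.2⟩
      have hget : pvAtbashTable.get? c = none := by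
        rw [PySem.Dict.get?_eq_none_iff_not_mem_keys]
        have hk : pvAtbashTable.keys
            = "abcdefghijklmnopqrstuvwxyzABCDEFGHIJKLMNOPQRSTUVWXYZ".toList := by decide
        rw [hk]
        intro hmem
        have := List.mem_map_of_mem (f := Char.toNat) hmem
        simp at this
        omega
      simp [pvAtbashCharA, hla, hua, hget]

lemma pvFoldl_atbash (l : List Char) (acc : String) :
    l.foldl (fun result char =>
      if 'a' ≤ char ∧ char ≤ 'z' then
        result ++ String.ofList [Char.ofNat ('z'.toNat - (char.toNat - 'a'.toNat))]
      else if 'A' ≤ char ∧ char ≤ 'Z' then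
        result ++ String.ofList [Char.ofNat ('Z'.toNat - (char.toNat - 'A'.toNat))]
      else
        result ++ String.ofList [char]) acc
    = acc ++ String.ofList (l.map pvAtbashCharA) := by
  induction l generalizing acc with
  | nil => simp
  | cons c t ih =>
    simp only [List.foldl, List.map]
    rw [ih]
    unfold pvAtbashCharA
    split_ifs <;> simp [String.append_assoc, ← String.ofList_append]

-- ===== VERDICT (by name: the statement is the Claim_ definition above) =====
theorem atbash_handler_spec : Claim_equal_atbash_handler := by
  intro text _
  unfold Spec_atbash_handler atbash_handler atbash_handler_alt
  rw [pvFoldl_atbash]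
  simp [funext pvAtbashChar_eq]
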